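-- pv_equiv track=rewrite | github.com/levelgigio/seguran-a_de_redes | entrega_2/app.py | remove_used_tokens
-- ===== SOURCE A (Python) =====
-- def remove_used_tokens(tokens, used_token):
--     used = 0
--     valid_tokens = tokens.copy()
--     for token in reversed(tokens):
--         if token == used_token or used == 1:
--             valid_tokens.remove(token)
--             used = 1
--
--     return valid_tokens
-- ===== SOURCE B (Python) =====
-- def remove_used_tokens(tokens, used_token):
--     if used_token not in tokens:
--         return tokens.copy()
--     i = tokens[::-1].index(used_token)
--     return tokens[len(tokens) - i:]
-- ===== Notes on version B (the rewrite author's own statement) =====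
-- stated objective: simpler
-- what changed: Instead of walking the reversed list and repeatedly calling list.remove, B observes that A's result is exactly the suffix after the last occurrence of used_token: one membership test, one reversed .index to locate that occurrence, one slice.
import Mathlib
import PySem

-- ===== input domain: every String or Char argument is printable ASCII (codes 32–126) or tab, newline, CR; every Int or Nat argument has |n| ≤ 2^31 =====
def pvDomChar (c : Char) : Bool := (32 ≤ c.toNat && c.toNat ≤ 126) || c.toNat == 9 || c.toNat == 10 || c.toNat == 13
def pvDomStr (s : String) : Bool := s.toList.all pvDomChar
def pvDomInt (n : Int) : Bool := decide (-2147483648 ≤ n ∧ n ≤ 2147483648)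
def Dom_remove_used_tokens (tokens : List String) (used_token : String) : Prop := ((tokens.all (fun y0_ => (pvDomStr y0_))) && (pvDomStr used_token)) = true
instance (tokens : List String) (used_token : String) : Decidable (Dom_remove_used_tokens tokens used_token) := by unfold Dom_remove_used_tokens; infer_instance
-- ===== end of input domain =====

-- B replaces A's reversed scan with repeated list.remove by locating the last occurrence of
-- used_token (membership test + reversed index) and returning the single slice after it (simpler).


-- ===== PORT A =====
-- one iteration of A's loop; the Option threads Python's ValueError from list.remove (none = raise)
def pvAStep (used_token : String) (st : Option (Int × List String)) (token : String) :
    Option (Int × List String) :=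
  match st with
  | none => none
  | some (used, valid) =>
    if token = used_token ∨ used = 1 then
      match PySem.List.remove? valid token with
      | none => none            -- list.remove raises ValueError (proved unreachable below)
      | some v => some (1, v)
    else some (used, valid)

def remove_used_tokens (tokens : List String) (used_token : String) : List String :=
  match tokens.reverse.foldl (pvAStep used_token) (some ((0 : Int), tokens)) with
  | some (_, valid) => valid
  | none => []                  -- unreachable: the removed token is always present

-- ===== PORT B =====
-- tokens[::-1] is tokens.reverse (PySem.List.slice?_none_none_neg_one); .index = PySem.List.index?
def remove_used_tokens_alt (tokens : List String) (used_token : String) : List String :=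
  if used_token ∉ tokens then tokens
  else
    match PySem.List.index? tokens.reverse used_token with
    | none => []    -- ValueError from .index (unreachable: used_token ∈ tokens here)
    | some i => PySem.List.slice tokens (some ((tokens.length : Int) - (i : Int))) none

-- ===== PRECONDITION & SPEC =====
def Spec_remove_used_tokens (tokens : List String) (used_token : String) (out : List String) : Prop := out = remove_used_tokens_alt tokens used_token
instance (tokens : List String) (used_token : String) (out : List String) : Decidable (Spec_remove_used_tokens tokens used_token out) := by unfold Spec_remove_used_tokens; infer_instance

-- ===== CLAIM (what is proved, stated in full; the proofs are below) =====
def Claim_equal_remove_used_tokens : Prop := ∀ (tokens : List String) (used_token : String), Dom_remove_used_tokens tokens used_token → Spec_remove_used_tokens tokens used_token (remove_used_tokens tokens used_token)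

-- ===== LEMMAS AND PROOFS =====

-- A's loop ignores elements ≠ used_token while used = 0
theorem pvA_skip (u : String) (l : List String) (v : List String) (hu : u ∉ l) :
    l.foldl (pvAStep u) (some ((0 : Int), v)) = some ((0 : Int), v) := by
  induction l generalizing v with
  | nil => rfl
  | cons a l ih =>
    have ha : a ≠ u := by intro h; exact hu (h ▸ List.mem_cons_self)
    have : pvAStep u (some ((0 : Int), v)) a = some ((0 : Int), v) := by
      simp [pvAStep, ha]
    rw [List.foldl_cons, this]
    exact ih _ (fun h => hu (List.mem_cons_of_mem _ h))

-- Once used = 1, the loop removes one first-occurrence per element; if the iterated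
-- elements are a permutation of a prefix p of the valid list p ++ s, exactly s remains.
theorem pvA_drain (u : String) (r : List String) :
    ∀ (p s : List String), r.Perm p →
      r.foldl (pvAStep u) (some ((1 : Int), p ++ s)) = some ((1 : Int), s) := by
  induction r with
  | nil =>
    intro p s hp
    have : p = [] := hp.symm.eq_nil
    simp [this]
  | cons b r ih =>
    intro p s hp
    have hb : b ∈ p := hp.mem_iff.mp List.mem_cons_self
    have hperm : r.Perm (p.erase b) := (List.cons_perm_iff_perm_erase.mp hp).2
    have hbm : b ∈ p ++ s := List.mem_append_left _ hb
    have hrem : PySem.List.remove? (p ++ s) b = some ((p ++ s).erase b) :=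
      PySem.List.remove?_eq_some_erase _ _ hbm
    have hstep : pvAStep u (some ((1 : Int), p ++ s)) b = some ((1 : Int), p.erase b ++ s) := by
      simp [pvAStep, hrem, List.erase_append_left _ hb]
    rw [List.foldl_cons, hstep]
    exact ih (p.erase b) s hperm

-- decomposition at the last occurrence
theorem pv_split_last (u : String) (l : List String) (h : u ∈ l) :
    ∃ p s, l = p ++ u :: s ∧ u ∉ s := by
  induction l with
  | nil => cases h
  | cons a l ih =>
    by_cases hl : u ∈ l
    · obtain ⟨p, s, rfl, hs⟩ := ih hl
      exact ⟨a :: p, s, rfl, hs⟩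
    · have : u = a := by
        rcases List.mem_cons.mp h with h1 | h2
        · exact h1
        · exact absurd h2 hl
      exact ⟨[], l, by simp [this], hl⟩

-- ===== VERDICT (by name: the statement is the Claim_ definition above) =====
theorem remove_used_tokens_spec : Claim_equal_remove_used_tokens := by
  intro tokens u _
  show remove_used_tokens tokens u = remove_used_tokens_alt tokens u
  by_cases hmem : u ∈ tokens
  · obtain ⟨p, s, rfl, hs⟩ := pv_split_last u tokens hmem
    -- A side
    have hrev : (p ++ u :: s).reverse = (s.reverse ++ [u]) ++ p.reverse := by
      simp [List.reverse_append]
    have hA : (p ++ u :: s).reverse.foldl (pvAStep u) (some ((0 : Int), p ++ u :: s))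
        = some ((1 : Int), s) := by
      rw [hrev, List.foldl_append, List.foldl_append]
      rw [pvA_skip u s.reverse _ (by simpa using hs)]
      have hmem' : u ∈ p ++ u :: s := List.mem_append_right _ List.mem_cons_self
      have hrem : PySem.List.remove? (p ++ u :: s) u = some ((p ++ u :: s).erase u) :=
        PySem.List.remove?_eq_some_erase _ _ hmem'
      have hstep : List.foldl (pvAStep u) (some ((0 : Int), p ++ u :: s)) [u]
          = some ((1 : Int), (p ++ u :: s).erase u) := by
        simp [pvAStep, hrem]
      rw [hstep]
      by_cases hup : u ∈ p
      · have herase : (p ++ u :: s).erase u = (p.erase u ++ [u]) ++ s := by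
          rw [List.erase_append_left _ hup]; simp
        have hperm : p.reverse.Perm (p.erase u ++ [u]) :=
          ((List.reverse_perm p).trans (List.perm_cons_erase hup)).trans
            ((List.perm_append_singleton u (p.erase u)).symm)
        rw [herase]
        exact pvA_drain u p.reverse (p.erase u ++ [u]) s hperm
      · have herase : (p ++ u :: s).erase u = p ++ s := by
          rw [List.erase_append_right _ hup]
          simp
        rw [herase]
        exact pvA_drain u p.reverse p s (List.reverse_perm p)
    have hA' : remove_used_tokens (p ++ u :: s) u = s := by
      unfold remove_used_tokens; rw [hA]
    -- B side
    have hB' : remove_used_tokens_alt (p ++ u :: s) u = s := by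
      have hmem2 : u ∈ p ++ u :: s := List.mem_append_right _ List.mem_cons_self
      have hrev2 : (p ++ u :: s).reverse = s.reverse ++ u :: p.reverse := by
        simp [List.reverse_append]
      have hfind : PySem.List.index? (p ++ u :: s).reverse u = some s.length := by
        rw [hrev2]
        exact (PySem.List.index?_eq_some_iff _ _ _).mpr
          ⟨s.reverse, p.reverse, rfl, by simp, by simpa using hs⟩
      have hidx2 : (((p ++ u :: s).length : Int) - (s.length : Int))
          = (((p.length + 1 : Nat)) : Int) := by
        simp; ring
      simp only [remove_used_tokens_alt, hmem2, not_true_eq_false, if_false, hfind]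
      rw [hidx2, PySem.List.slice_from_natCast]
      have hlen : p.length + 1 = (p ++ [u]).length := by simp
      calc (p ++ u :: s).drop (p.length + 1)
          = ((p ++ [u]) ++ s).drop ((p ++ [u]).length) := by rw [← hlen]; simp
        _ = s := List.drop_left
    rw [hA', hB']
  · -- u absent: A returns tokens, B slices from 0
    have hA : tokens.reverse.foldl (pvAStep u) (some ((0 : Int), tokens)) = some ((0 : Int), tokens) :=
      pvA_skip u tokens.reverse tokens (by simpa using hmem)
    have hA' : remove_used_tokens tokens u = tokens := by
      unfold remove_used_tokens; rw [hA]
    have hB' : remove_used_tokens_alt tokens u = tokens := by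
      simp [remove_used_tokens_alt, hmem]
    rw [hA', hB']
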